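-- pv_equiv track=rewrite | github.com/Mert544/Apex-orchestrator | app/tools/dependency_graph.py | _resolve_internal_import
-- ===== SOURCE A (Python) =====
-- def _resolve_internal_import(import_name: str, module_map: dict[str, str]) -> str | None:
--     if import_name in module_map:
--         return module_map[import_name]
--
--     parts = import_name.split(".")
--     while parts:
--         candidate = ".".join(parts)
--         if candidate in module_map:
--             return module_map[candidate]
--         parts.pop()
--     return None
-- ===== SOURCE B (Python) =====
-- def _resolve_internal_import(import_name: str, module_map: dict[str, str]) -> str | None:
--     best = None
--     for key, value in module_map.items():
--         if import_name == key or import_name.startswith(key + "."):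
--             if best is None or len(best[0]) < len(key):
--                 best = (key, value)
--     return best[1] if best is not None else None
-- ===== Notes on version B (the rewrite author's own statement) =====
-- stated objective: alternative
-- what changed: Instead of generating successively shorter dotted prefixes of import_name and probing the map for each, B scans the map's items once and keeps the entry whose key is the longest dotted-prefix match (key == import_name or import_name.startswith(key + '.')).
import Mathlib
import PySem

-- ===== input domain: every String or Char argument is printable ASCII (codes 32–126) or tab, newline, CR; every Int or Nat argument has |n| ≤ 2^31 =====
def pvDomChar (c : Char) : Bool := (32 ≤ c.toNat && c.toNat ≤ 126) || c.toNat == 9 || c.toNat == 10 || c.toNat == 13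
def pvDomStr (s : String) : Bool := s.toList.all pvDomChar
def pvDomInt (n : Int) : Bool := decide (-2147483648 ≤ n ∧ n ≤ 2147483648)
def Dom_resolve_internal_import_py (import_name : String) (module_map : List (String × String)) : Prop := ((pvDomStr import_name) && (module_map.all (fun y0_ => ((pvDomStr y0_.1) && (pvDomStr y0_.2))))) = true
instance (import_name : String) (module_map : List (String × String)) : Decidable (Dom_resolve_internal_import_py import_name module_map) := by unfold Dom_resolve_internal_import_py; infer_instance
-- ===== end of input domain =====

-- B replaces A's probe-shrinking-prefixes loop by a single scan over the map's entries keeping the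
-- longest dotted-prefix-matching key (alternative traversal, same results).

-- ===== PORT A =====
-- 'k in d' / 'd[k]' on the association list: first entry with that key.
def pvLookup (module_map : List (String × String)) (k : String) : Option String :=
  (module_map.find? (fun p => p.1 == k)).map (·.2)

-- A's while loop; i = how many parts are still in `parts` (parts.pop() drops the last one).
def resolveLoopA (module_map : List (String × String)) (parts : List String) : Nat → Option String
  | 0 => none
  | i + 1 =>
    match pvLookup module_map (PySem.Str.join "." (parts.take (i + 1))) with
    | some v => some v
    | none => resolveLoopA module_map parts i

def resolve_internal_import_py (import_name : String) (module_map : List (String × String)) : Option String :=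
  match pvLookup module_map import_name with
  | some v => some v
  | none =>
    let parts := (PySem.Str.split? import_name ".").getD []   -- '.' ≠ "": split? is always `some` here
    resolveLoopA module_map parts parts.length

-- ===== PORT B =====
-- one step of B's scan: keep the entry whose key is the longest dotted-prefix match seen so far
def stepB (import_name : String) (best : Option (String × String)) (p : String × String) : Option (String × String) :=
  if import_name == p.1 || PySem.Str.startswith import_name (p.1 ++ ".") then
    match best with
    | none => some p
    | some b => if PySem.Str.len b.1 < PySem.Str.len p.1 then some p else some b
  else best

def resolve_internal_import_py_alt (import_name : String) (module_map : List (String × String)) : Option String :=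
  (module_map.foldl (stepB import_name) none).map (·.2)

-- ===== PRECONDITION & SPEC =====
def Spec_resolve_internal_import_py (import_name : String) (module_map : List (String × String)) (out : Option String) : Prop := out = resolve_internal_import_py_alt import_name module_map
instance (import_name : String) (module_map : List (String × String)) (out : Option String) : Decidable (Spec_resolve_internal_import_py import_name module_map out) := by unfold Spec_resolve_internal_import_py; infer_instance

-- ===== CLAIM (what is proved, stated in full; the proofs are below) =====
def Claim_equal_resolve_internal_import_py : Prop := ∀ (import_name : String) (module_map : List (String × String)), Dom_resolve_internal_import_py import_name module_map → Spec_resolve_internal_import_py import_name module_map (resolve_internal_import_py import_name module_map)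

-- ===== LEMMAS AND PROOFS =====

-- reference single-character split on '.'
def split1 : List Char → List (List Char)
  | [] => [[]]
  | c :: rest =>
    if c = '.' then [] :: split1 rest
    else
      match split1 rest with
      | [] => [[c]]
      | h :: t => (c :: h) :: t

theorem split1_ne_nil (l : List Char) : split1 l ≠ [] := by
  cases l with
  | nil => simp [split1]
  | cons c rest =>
    simp only [split1]
    split
    · simp
    · cases h : split1 rest <;> simp

theorem go_eq_split1 (fuel : Nat) (l cur : List Char) (acc : List (List Char)) (h : l.length < fuel) :
    PySem.Chars.splitOn.go ['.'] fuel l cur acc =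
      acc.reverse ++ (match split1 l with
        | [] => []
        | hd :: t => (cur.reverse ++ hd) :: t) := by
  induction fuel generalizing l cur acc with
  | zero => omega
  | succ fuel ih =>
    cases l with
    | nil =>
      rw [PySem.Chars.splitOn.go]
      simp [split1]
      omega
    | cons c rest =>
      rw [PySem.Chars.splitOn.go]
      by_cases hc : c = '.'
      · have hp : List.isPrefixOf ['.'] (c :: rest) = true := by simp [List.isPrefixOf, hc]
        rw [if_pos hp]
        simp only [List.length_singleton, List.drop_succ_cons, List.drop_zero]
        rw [ih rest [] (cur.reverse :: acc) (by simpa using Nat.lt_of_succ_lt_succ h)]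
        simp [split1, hc]
        cases hs : split1 rest with
        | nil => exact absurd hs (split1_ne_nil rest)
        | cons hd t => simp
      · have hp : List.isPrefixOf ['.'] (c :: rest) = true → False := by
          simp [List.isPrefixOf]; intro hh; exact hc hh.symm
        rw [if_neg (by simpa using hp)]
        rw [ih rest (c :: cur) acc (by simpa using Nat.lt_of_succ_lt_succ h)]
        simp [split1, hc]
        cases hs : split1 rest with
        | nil => exact absurd hs (split1_ne_nil rest)
        | cons hd t => simp

theorem splitOn_eq_split1 (l : List Char) : PySem.Chars.splitOn l ['.'] = split1 l := by
  rw [PySem.Chars.splitOn, go_eq_split1 _ _ _ _ (Nat.lt_succ_self _)]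
  cases hs : split1 l with
  | nil => exact absurd hs (split1_ne_nil l)
  | cons hd t => simp

theorem join_split1 (l : List Char) : PySem.Chars.join ['.'] (split1 l) = l := by
  induction l with
  | nil => simp [split1, PySem.Chars.join_singleton]
  | cons c rest ih =>
    simp only [split1]
    by_cases hc : c = '.'
    · rw [if_pos hc]
      cases hs : split1 rest with
      | nil => exact absurd hs (split1_ne_nil rest)
      | cons hd t =>
        rw [hs] at ih
        rw [PySem.Chars.join_cons_cons, ih, hc]
        simp
    · rw [if_neg hc]
      cases hs : split1 rest with
      | nil => exact absurd hs (split1_ne_nil rest)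
      | cons hd t =>
        rw [hs] at ih
        cases t with
        | nil =>
          rw [PySem.Chars.join_singleton] at ih
          simp [PySem.Chars.join_singleton, ih]
        | cons hd2 t2 =>
          rw [PySem.Chars.join_cons_cons] at ih
          rw [PySem.Chars.join_cons_cons]
          simpa using ih

theorem dot_not_mem_split1 (l : List Char) (p : List Char) (hp : p ∈ split1 l) : '.' ∉ p := by
  induction l generalizing p with
  | nil => simp [split1] at hp; simp [hp]
  | cons c rest ih =>
    simp only [split1] at hp
    by_cases hc : c = '.'
    · rw [if_pos hc] at hp
      rcases List.mem_cons.mp hp with h | h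
      · simp [h]
      · exact ih p h
    · rw [if_neg hc] at hp
      cases hs : split1 rest with
      | nil => exact absurd hs (split1_ne_nil rest)
      | cons hd t =>
        rw [hs] at hp
        rcases List.mem_cons.mp hp with h | h
        · subst h
          intro hmem
          rcases List.mem_cons.mp hmem with h' | h'
          · exact hc h'.symm
          · exact ih hd (hs ▸ List.mem_cons_self) h'
        · exact ih p (hs ▸ List.mem_cons.mpr (Or.inr h))

theorem join_split_at (ps : List (List Char)) (i : Nat) (h1 : 0 < i) (h2 : i < ps.length) :
    PySem.Chars.join ['.'] ps =
      PySem.Chars.join ['.'] (ps.take i) ++ '.' :: PySem.Chars.join ['.'] (ps.drop i) := by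
  induction ps generalizing i with
  | nil => simp at h2
  | cons p ps ih =>
    cases i with
    | zero => omega
    | succ i =>
      cases i with
      | zero =>
        simp only [List.take, List.drop]
        cases ps with
        | nil => simp at h2
        | cons q qs =>
          rw [PySem.Chars.join_cons_cons, PySem.Chars.join_singleton]
          simp
      | succ i =>
        have h2' : i + 1 < ps.length := by simpa using h2
        have := ih (i + 1) (Nat.succ_pos _) h2'
        simp only [List.take, List.drop]
        cases hps : ps with
        | nil => simp [hps] at h2'
        | cons q qs =>
          rw [hps] at this
          have htake : (q :: qs).take (i+1) ≠ [] := by simp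
          cases ht : (q :: qs).take (i + 1) with
          | nil => exact absurd ht htake
          | cons a as =>
            rw [ht] at this
            rw [PySem.Chars.join_cons_cons, PySem.Chars.join_cons_cons, this]
            simp

theorem join_take_len_lt (ps : List (List Char)) (i j : Nat) (h0 : 0 < i) (hij : i < j)
    (hj : j ≤ ps.length) :
    (PySem.Chars.join ['.'] (ps.take i)).length < (PySem.Chars.join ['.'] (ps.take j)).length := by
  have hlen : i < (ps.take j).length := by
    rw [List.length_take]; omega
  have := join_split_at (ps.take j) i h0 hlen
  rw [List.take_take, min_eq_left (le_of_lt hij)] at this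
  rw [this]
  simp

theorem prefix_dot_eq_take (ps : List (List Char)) (k : List Char)
    (hne : ps ≠ []) (hdot : ∀ p ∈ ps, '.' ∉ p)
    (h : (k ++ ['.']) <+: PySem.Chars.join ['.'] ps) :
    ∃ i, 1 ≤ i ∧ i < ps.length ∧ k = PySem.Chars.join ['.'] (ps.take i) := by
  induction ps generalizing k with
  | nil => exact absurd rfl hne
  | cons p ps ih =>
    cases ps with
    | nil =>
      rw [PySem.Chars.join_singleton] at h
      exact absurd (List.IsPrefix.mem (by simp) h) (hdot p (by simp))
    | cons q qs =>
      rw [PySem.Chars.join_cons_cons] at h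
      have hwhole : (k ++ ['.']) <+: p ++ ['.'] ++ PySem.Chars.join ['.'] (q :: qs) := h
      rcases Nat.lt_trichotomy k.length p.length with hlt | heq | hgt
      · -- k ++ ['.'] would be a prefix of p, putting '.' in p
        have hp : p <+: p ++ ['.'] ++ PySem.Chars.join ['.'] (q :: qs) := by
          rw [List.append_assoc]; exact List.prefix_append p _
        have hpre : (k ++ ['.']) <+: p :=
          List.prefix_of_prefix_length_le hwhole hp (by simp; omega)
        exact absurd (List.IsPrefix.mem (by simp) hpre) (hdot p (by simp))
      · -- k = p
        have hk : k <+: p ++ ['.'] ++ PySem.Chars.join ['.'] (q :: qs) :=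
          List.IsPrefix.trans (List.prefix_append k _) hwhole
        have hp : p <+: p ++ ['.'] ++ PySem.Chars.join ['.'] (q :: qs) := by
          rw [List.append_assoc]; exact List.prefix_append p _
        have : k = p := List.IsPrefix.eq_of_length
          (List.prefix_of_prefix_length_le hk hp (le_of_eq heq)) heq
        exact ⟨1, le_refl 1, by simp, by simpa [PySem.Chars.join_singleton] using this⟩
      · -- k extends p ++ ['.']
        have hpd : (p ++ ['.']) <+: p ++ ['.'] ++ PySem.Chars.join ['.'] (q :: qs) :=
          List.prefix_append _ _
        have hkw : k <+: p ++ ['.'] ++ PySem.Chars.join ['.'] (q :: qs) :=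
          List.IsPrefix.trans (List.prefix_append k _) hwhole
        have hpk : (p ++ ['.']) <+: k :=
          List.prefix_of_prefix_length_le hpd hkw (by simp; omega)
        obtain ⟨k', rfl⟩ := hpk
        have hk' : (k' ++ ['.']) <+: PySem.Chars.join ['.'] (q :: qs) := by
          obtain ⟨t, ht⟩ := hwhole
          refine ⟨t, ?_⟩
          simp only [List.append_assoc] at ht
          have h1 := List.append_cancel_left ht
          have h2 := List.append_cancel_left h1
          simpa [List.append_assoc] using h2
        obtain ⟨i, hi1, hi2, hk'eq⟩ := ih k' (by simp)
          (fun r hr => hdot r (List.mem_cons.mpr (Or.inr hr))) hk'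
        refine ⟨i + 1, by omega, by simpa using Nat.succ_lt_succ hi2, ?_⟩
        cases ht : (q :: qs).take i with
        | nil => rw [ht] at hk'eq; simp at ht; omega
        | cons a as =>
          simp only [List.take, ht]
          rw [PySem.Chars.join_cons_cons, ← ht, ← hk'eq]

def matchesL (nm k : List Char) : Prop := k = nm ∨ (k ++ ['.']) <+: nm

theorem matchesL_iff (nm k : List Char) :
    matchesL nm k ↔ ∃ i, 1 ≤ i ∧ i ≤ (split1 nm).length ∧
      k = PySem.Chars.join ['.'] ((split1 nm).take i) := by
  have hne := split1_ne_nil nm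
  have hlen : 1 ≤ (split1 nm).length := by
    cases h : split1 nm with
    | nil => exact absurd h hne
    | cons a as => simp
  constructor
  · rintro (h | hpre)
    · subst h
      exact ⟨(split1 k).length, hlen, le_refl _, by rw [List.take_length, join_split1]⟩
    · rw [← join_split1 nm] at hpre
      obtain ⟨i, h1, h2, h3⟩ := prefix_dot_eq_take (split1 nm) k hne (dot_not_mem_split1 nm) hpre
      exact ⟨i, h1, le_of_lt h2, h3⟩
  · rintro ⟨i, h1, h2, rfl⟩
    rcases eq_or_lt_of_le h2 with heq | hlt
    · left; rw [heq, List.take_length, join_split1]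
    · right
      have := join_split_at (split1 nm) i (by omega) hlt
      rw [join_split1] at this
      refine ⟨PySem.Chars.join ['.'] ((split1 nm).drop i), ?_⟩
      conv_rhs => rw [this]
      simp

theorem cond_iff (nm k : String) :
    (nm == k || PySem.Str.startswith nm (k ++ ".")) = true ↔ matchesL nm.toList k.toList := by
  rw [Bool.or_eq_true, beq_iff_eq, PySem.Str.startswith]
  have htl : (k ++ ".").toList = k.toList ++ ['.'] := by
    simp
  rw [htl, PySem.Chars.startswith_iff]
  constructor
  · rintro (rfl | h)
    · exact Or.inl rfl
    · exact Or.inr h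
  · rintro (h | h)
    · exact Or.inl (String.toList_inj.mp h).symm
    · exact Or.inr h


-- merge = left-biased longest-key maximum
def mergeB (a b : Option (String × String)) : Option (String × String) :=
  match a, b with
  | none, b => b
  | some x, none => some x
  | some x, some y => if PySem.Str.len x.1 < PySem.Str.len y.1 then some y else some x

theorem stepB_eq_merge (nm : String) (best : Option (String × String)) (p : String × String) :
    stepB nm best p = mergeB best (if (nm == p.1 || PySem.Str.startswith nm (p.1 ++ ".")) then some p else none) := by
  unfold stepB mergeB
  cases best <;> split <;> rfl

theorem mergeB_none_right (a : Option (String × String)) : mergeB a none = a := by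
  cases a <;> rfl

theorem mergeB_assoc (a b c : Option (String × String)) :
    mergeB (mergeB a b) c = mergeB a (mergeB b c) := by
  cases a with
  | none => rfl
  | some x =>
    cases b with
    | none => rfl
    | some y =>
      cases c with
      | none => rw [mergeB_none_right, mergeB_none_right]
      | some z =>
        by_cases hxy : PySem.Str.len x.1 < PySem.Str.len y.1 <;>
        by_cases hyz : PySem.Str.len y.1 < PySem.Str.len z.1 <;>
        by_cases hxz : PySem.Str.len x.1 < PySem.Str.len z.1 <;>
        simp only [mergeB, hxy, hyz, hxz, if_true, if_false] <;>
        first | rfl | (exfalso; unfold PySem.Str.len at *; omega)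

def bestRec (nm : String) : List (String × String) → Option (String × String)
  | [] => none
  | p :: rest =>
    mergeB (if (nm == p.1 || PySem.Str.startswith nm (p.1 ++ ".")) then some p else none) (bestRec nm rest)

theorem foldl_stepB_eq (nm : String) (m : List (String × String)) (acc : Option (String × String)) :
    m.foldl (stepB nm) acc = mergeB acc (bestRec nm m) := by
  induction m generalizing acc with
  | nil => cases acc <;> rfl
  | cons p rest ih =>
    rw [List.foldl_cons, ih, stepB_eq_merge, mergeB_assoc]
    rfl

theorem bestRec_none_iff (nm : String) (m : List (String × String)) :
    bestRec nm m = none ↔ ∀ p ∈ m, (nm == p.1 || PySem.Str.startswith nm (p.1 ++ ".")) = false := by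
  induction m with
  | nil => simp [bestRec]
  | cons p rest ih =>
    simp only [bestRec, List.mem_cons]
    constructor
    · intro h
      cases hc : (nm == p.1 || PySem.Str.startswith nm (p.1 ++ ".")) with
      | true =>
        rw [if_pos hc] at h
        cases hr : bestRec nm rest <;> simp [hr, mergeB] at h
        split at h <;> simp at h
      | false =>
        rw [if_neg (by intro hx; rw [hc] at hx; exact Bool.false_ne_true hx)] at h
        simp [mergeB] at h
        intro q hq
        rcases hq with rfl | hq
        · exact hc
        · exact ih.mp h q hq
    · intro h
      rw [if_neg (by intro hx; rw [h p (Or.inl rfl)] at hx; exact Bool.false_ne_true hx)]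
      simpa [mergeB] using ih.mpr (fun q hq => h q (Or.inr hq))

theorem bestRec_some (nm : String) (m : List (String × String)) (b : String × String)
    (h : bestRec nm m = some b) :
    (nm == b.1 || PySem.Str.startswith nm (b.1 ++ ".")) = true ∧
    (∀ p ∈ m, (nm == p.1 || PySem.Str.startswith nm (p.1 ++ ".")) = true →
       p.1.toList.length ≤ b.1.toList.length) ∧
    m.find? (fun p => p.1 == b.1) = some b := by
  induction m generalizing b with
  | nil => simp [bestRec] at h
  | cons p rest ih =>
    simp only [bestRec] at h
    cases hc : (nm == p.1 || PySem.Str.startswith nm (p.1 ++ ".")) with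
    | false =>
      rw [if_neg (by intro hx; rw [hc] at hx; exact Bool.false_ne_true hx)] at h
      simp only [mergeB] at h
      obtain ⟨hb1, hb2, hb3⟩ := ih b h
      have hne : (p.1 == b.1) = false := by
        by_contra hx
        simp at hx
        rw [hx] at hc
        rw [hc] at hb1
        exact Bool.false_ne_true hb1
      refine ⟨hb1, ?_, ?_⟩
      · intro q hq hqc
        rcases List.mem_cons.mp hq with rfl | hq
        · rw [hc] at hqc; exact absurd hqc Bool.false_ne_true
        · exact hb2 q hq hqc
      · rw [List.find?_cons_of_neg (by simp [hne])]
        exact hb3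
    | true =>
      rw [if_pos hc] at h
      cases hr : bestRec nm rest with
      | none =>
        rw [hr] at h
        simp only [mergeB] at h
        obtain rfl := Option.some.inj h
        refine ⟨hc, ?_, ?_⟩
        · intro q hq hqc
          rcases List.mem_cons.mp hq with rfl | hq
          · exact le_rfl
          · rw [bestRec_none_iff] at hr
            rw [hr q hq] at hqc
            exact absurd hqc Bool.false_ne_true
        · rw [List.find?_cons_of_pos (by simp)]
      | some b' =>
        rw [hr] at h
        simp only [mergeB] at h
        obtain ⟨hb1', hb2', hb3'⟩ := ih b' hr
        split at h
        · -- keeps b' (strictly longer)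
          obtain rfl := Option.some.inj h
          rename_i hlt
          unfold PySem.Str.len at hlt
          have hplt : p.1.toList.length < b'.1.toList.length := by exact_mod_cast hlt
          refine ⟨hb1', ?_, ?_⟩
          · intro q hq hqc
            rcases List.mem_cons.mp hq with rfl | hq
            · omega
            · exact hb2' q hq hqc
          · rw [List.find?_cons_of_neg (by
              simp only [beq_iff_eq]
              intro hx
              rw [hx] at hplt
              omega)]
            exact hb3'
        · -- keeps p (at least as long)
          obtain rfl := Option.some.inj h
          rename_i hnlt
          unfold PySem.Str.len at hnlt
          have hple : b'.1.toList.length ≤ p.1.toList.length := by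
            rw [not_lt] at hnlt; exact_mod_cast hnlt
          refine ⟨hc, ?_, ?_⟩
          · intro q hq hqc
            rcases List.mem_cons.mp hq with rfl | hq
            · omega
            · exact le_trans (hb2' q hq hqc) hple
          · rw [List.find?_cons_of_pos (by simp)]

-- A-side: the index of the longest candidate still in the map
def jb (m : List (String × String)) (parts : List String) : Nat → Option Nat
  | 0 => none
  | i + 1 =>
    if (pvLookup m (PySem.Str.join "." (parts.take (i + 1)))).isSome then some (i + 1)
    else jb m parts i

theorem resolveLoopA_eq_jb (m : List (String × String)) (parts : List String) (i : Nat) :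
    resolveLoopA m parts i = (jb m parts i).bind (fun j => pvLookup m (PySem.Str.join "." (parts.take j))) := by
  induction i with
  | zero => rfl
  | succ i ih =>
    simp only [resolveLoopA, jb]
    cases hl : pvLookup m (PySem.Str.join "." (parts.take (i + 1))) with
    | some v => simp [hl]
    | none => simp [ih]

theorem jb_none_iff (m : List (String × String)) (parts : List String) (i : Nat) :
    jb m parts i = none ↔ ∀ j, 1 ≤ j → j ≤ i → pvLookup m (PySem.Str.join "." (parts.take j)) = none := by
  induction i with
  | zero => simp [jb]; omega
  | succ i ih =>
    simp only [jb]
    cases hl : pvLookup m (PySem.Str.join "." (parts.take (i + 1))) with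
    | some v =>
      simp
      exact ⟨i + 1, by omega, le_refl _, by simp [hl]⟩
    | none =>
      simp only [Option.isSome_none, Bool.false_eq_true, if_false, ih]
      constructor
      · intro hall j h1 h2
        rcases Nat.lt_or_ge j (i + 1) with hj | hj
        · exact hall j h1 (by omega)
        · have : j = i + 1 := by omega
          rw [this]; exact hl
      · intro hall j h1 h2
        exact hall j h1 (by omega)

theorem jb_some (m : List (String × String)) (parts : List String) (i j : Nat)
    (h : jb m parts i = some j) :
    1 ≤ j ∧ j ≤ i ∧ (pvLookup m (PySem.Str.join "." (parts.take j))).isSome ∧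
      ∀ j', j < j' → j' ≤ i → pvLookup m (PySem.Str.join "." (parts.take j')) = none := by
  induction i with
  | zero => simp [jb] at h
  | succ i ih =>
    simp only [jb] at h
    cases hl : pvLookup m (PySem.Str.join "." (parts.take (i + 1))) with
    | some v =>
      rw [if_pos (by simp [hl])] at h
      obtain rfl := Option.some.inj h
      exact ⟨by omega, le_refl _, by simp [hl], fun j' h1 h2 => by omega⟩
    | none =>
      rw [if_neg (by simp [hl])] at h
      obtain ⟨h1, h2, h3, h4⟩ := ih h
      refine ⟨h1, by omega, h3, ?_⟩
      intro j' hj1 hj2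
      rcases Nat.lt_or_ge j' (i + 1) with hj | hj
      · exact h4 j' hj1 (by omega)
      · have : j' = i + 1 := by omega
        rw [this]; exact hl


-- bridges between the String-level ports and the char-level lemmas
theorem parts_eq (nm : String) :
    ((PySem.Str.split? nm ".").getD []) = (split1 nm.toList).map String.ofList := by
  rw [PySem.Str.split?]
  have hdot : (".").toList = ['.'] := rfl
  rw [hdot, PySem.Chars.split?]
  simp [splitOn_eq_split1]

theorem candS_toList (nm : String) (j : Nat) :
    (PySem.Str.join "." ((((PySem.Str.split? nm ".").getD []).take j))).toList =
      PySem.Chars.join ['.'] ((split1 nm.toList).take j) := by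
  rw [parts_eq, PySem.Str.join]
  rw [String.toList_ofList]
  congr 1
  rw [← List.map_take, List.map_map]
  simp [Function.comp_def]

theorem candS_full (nm : String) :
    PySem.Str.join "." (((PySem.Str.split? nm ".").getD [])) = nm := by
  apply String.toList_inj.mp
  have h := candS_toList nm (split1 nm.toList).length
  rw [parts_eq] at h ⊢
  rw [List.take_of_length_le (by simp)] at h
  rw [h, List.take_length, join_split1]

theorem pvLookup_mem (m : List (String × String)) (k : String) (h : pvLookup m k ≠ none) :
    ∃ q ∈ m, q.1 = k := by
  unfold pvLookup at h
  cases hf : m.find? (fun p => p.1 == k) with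
  | none => rw [hf] at h; simp at h
  | some q =>
    have hq := List.find?_some hf
    exact ⟨q, List.mem_of_find?_eq_some hf, by simpa using hq⟩

-- the outer membership test of A is its loop's first iteration
theorem resolveA_eq_loop (nm : String) (m : List (String × String)) :
    resolve_internal_import_py nm m =
      resolveLoopA m ((PySem.Str.split? nm ".").getD [])
        ((PySem.Str.split? nm ".").getD []).length := by
  unfold resolve_internal_import_py
  cases hl : pvLookup m nm with
  | none => rfl
  | some v =>
    have hlen : ((PySem.Str.split? nm ".").getD []).length = (split1 nm.toList).length := by
      rw [parts_eq]; simp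
    have hne := split1_ne_nil nm.toList
    cases hsp : (split1 nm.toList).length with
    | zero => simp [List.length_eq_zero_iff] at hsp; exact absurd hsp hne
    | succ k =>
      rw [hlen, hsp]
      simp only [resolveLoopA]
      have : ((PySem.Str.split? nm ".").getD []).take (k + 1) = ((PySem.Str.split? nm ".").getD []) := by
        apply List.take_of_length_le
        rw [hlen, hsp]
      rw [this, candS_full, hl]

-- ===== VERDICT (by name: the statement is the Claim_ definition above) =====
theorem resolve_internal_import_py_spec : Claim_equal_resolve_internal_import_py := by
  intro nm m _
  unfold Spec_resolve_internal_import_py resolve_internal_import_py_alt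
  rw [foldl_stepB_eq]
  have hmergenone : ∀ x, mergeB none x = x := fun x => rfl
  rw [hmergenone]
  rw [resolveA_eq_loop, resolveLoopA_eq_jb]
  set parts := ((PySem.Str.split? nm ".").getD []) with hparts
  have hlen : parts.length = (split1 nm.toList).length := by
    rw [hparts, parts_eq]; simp
  cases hbr : bestRec nm m with
  | none =>
    have hnone : jb m parts parts.length = none := by
      rw [jb_none_iff]
      intro j h1 h2
      by_contra hx
      obtain ⟨q, hqm, hqk⟩ := pvLookup_mem m _ hx
      have hcond : (nm == q.1 || PySem.Str.startswith nm (q.1 ++ ".")) = true := by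
        rw [cond_iff, matchesL_iff]
        exact ⟨j, h1, by omega, by rw [hqk]; exact (candS_toList nm j)⟩
      rw [bestRec_none_iff] at hbr
      rw [hbr q hqm] at hcond
      exact absurd hcond Bool.false_ne_true
    rw [hnone]
    rfl
  | some b =>
    obtain ⟨hb1, hb2, hb3⟩ := bestRec_some nm m b hbr
    rw [cond_iff, matchesL_iff] at hb1
    obtain ⟨i, hi1, hi2, hieq⟩ := hb1
    have hcandS : PySem.Str.join "." (parts.take i) = b.1 := by
      apply String.toList_inj.mp
      rw [candS_toList nm i, ← hieq]
    have hlookupi : pvLookup m (PySem.Str.join "." (parts.take i)) = some b.2 := by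
      unfold pvLookup
      rw [hcandS, hb3]
      rfl
    have hjbne : jb m parts parts.length ≠ none := by
      intro hx
      rw [jb_none_iff] at hx
      have := hx i hi1 (by omega)
      rw [hlookupi] at this
      exact Option.some_ne_none _ this
    cases hjb : jb m parts parts.length with
    | none => exact absurd hjb hjbne
    | some j =>
      obtain ⟨hj1, hj2, hj3, hj4⟩ := jb_some m parts parts.length j hjb
      have hij : i = j := by
        rcases Nat.lt_trichotomy i j with hlt | heq | hgt
        · -- i < j: the found key at j would be a longer match than b
          exfalso
          have hx : pvLookup m (PySem.Str.join "." (parts.take j)) ≠ none := by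
            intro hc; rw [hc] at hj3; simp at hj3
          obtain ⟨q, hqm, hqk⟩ := pvLookup_mem m _ hx
          have hcond : (nm == q.1 || PySem.Str.startswith nm (q.1 ++ ".")) = true := by
            rw [cond_iff, matchesL_iff]
            exact ⟨j, by omega, by omega, by rw [hqk]; exact (candS_toList nm j)⟩
          have hle := hb2 q hqm hcond
          have hqlen : q.1.toList.length = (PySem.Chars.join ['.'] ((split1 nm.toList).take j)).length := by
            rw [hqk, candS_toList nm j]
          have hblen : b.1.toList.length = (PySem.Chars.join ['.'] ((split1 nm.toList).take i)).length := by
            rw [hieq]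
          have hlt2 := join_take_len_lt (split1 nm.toList) i j (by omega) hlt (by omega)
          omega
        · exact heq
        · -- j < i would contradict maximality of jb
          have := hj4 i hgt (by omega)
          rw [hlookupi] at this
          exact absurd this (Option.some_ne_none _)
      subst hij
      simp [hlookupi]
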